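-- pv_equiv track=rewrite | github.com/migsolis/state_export_import_tool | state_import_tool.py | generate_subpaths
-- ===== SOURCE A (Python) =====
-- def generate_subpaths(path: str) -> set:
--     path_parts = path.split('/')
--
--     subpath = path_parts[0]
--     subpaths = set([subpath])
--     for p in path_parts[1:]:
--         subpath += "/" + p
--         subpaths.add(subpath)
--
--     return subpaths
-- ===== SOURCE B (Python) =====
-- def generate_subpaths(path: str) -> set:
--     path_parts = path.split('/')
--     return {'/'.join(path_parts[:i + 1]) for i in range(len(path_parts))}
-- ===== Notes on version B (the rewrite author's own statement) =====
-- stated objective: simpler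
-- what changed: Replaces the accumulator-passing loop (growing string plus mutated set) with a stateless set comprehension that derives each prefix independently by joining a slice of the split parts.
import Mathlib
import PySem

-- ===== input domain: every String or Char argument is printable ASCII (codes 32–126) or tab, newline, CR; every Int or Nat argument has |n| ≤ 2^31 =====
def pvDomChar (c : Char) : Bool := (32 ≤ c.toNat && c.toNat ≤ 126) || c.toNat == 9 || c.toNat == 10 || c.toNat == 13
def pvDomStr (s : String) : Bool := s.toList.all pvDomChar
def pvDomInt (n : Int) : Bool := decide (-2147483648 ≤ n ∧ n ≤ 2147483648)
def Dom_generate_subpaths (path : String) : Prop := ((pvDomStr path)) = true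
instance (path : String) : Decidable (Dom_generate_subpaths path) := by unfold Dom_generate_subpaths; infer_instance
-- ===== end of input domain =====

-- B builds each prefix independently by joining a slice of the split parts (stateless comprehension)
-- instead of A's accumulator loop; same values, objective: simpler decomposition.

-- ===== PORT A =====
def generate_subpaths (path : String) : List String :=
  let path_parts := (PySem.Str.split? path "/").getD []  -- sep "/" ≠ "", so split? is never none
  match path_parts with
  | [] => []  -- unreachable (str.split always returns ≥ 1 part); totality guard only
  | subpath :: rest =>  -- subpath = path_parts[0], rest = path_parts[1:]
    (rest.foldl
      (fun (st : String × PySem.Set String) p =>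
        let sp := st.1 ++ "/" ++ p
        (sp, PySem.Set.add st.2 sp))
      (subpath, PySem.Set.ofList [subpath])).2

-- ===== PORT B =====
def generate_subpaths_alt (path : String) : List String :=
  let path_parts := (PySem.Str.split? path "/").getD []  -- sep "/" ≠ "", so split? is never none
  PySem.Set.ofList ((PySem.List.pyRange 0 path_parts.length).map
    (fun i => PySem.Str.join "/" (PySem.List.slice path_parts none (some (i + 1)))))

-- ===== PRECONDITION & SPEC =====
def Spec_generate_subpaths (path : String) (out : List String) : Prop := out = generate_subpaths_alt path
instance (path : String) (out : List String) : Decidable (Spec_generate_subpaths path out) := by unfold Spec_generate_subpaths; infer_instance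

-- ===== CLAIM (what is proved, stated in full; the proofs are below) =====
def Claim_equal_generate_subpaths : Prop := ∀ (path : String), Dom_generate_subpaths path → Spec_generate_subpaths path (generate_subpaths path)

-- ===== LEMMAS AND PROOFS =====

-- the list of proper extensions of acc by successive parts: [acc/p1, acc/p1/p2, …]
def tailpref : String → List String → List String
  | _, [] => []
  | acc, p :: t => (acc ++ "/" ++ p) :: tailpref (acc ++ "/" ++ p) t

theorem len_lt_tailpref (t : List String) (acc : String) :
    ∀ x ∈ tailpref acc t, acc.length < x.length := by
  induction t generalizing acc with
  | nil => intro x hx; simp [tailpref] at hx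
  | cons p t ih =>
    intro x hx
    simp only [tailpref, List.mem_cons] at hx
    rcases hx with rfl | hx
    · simp [String.length_append, show "/".length = 1 from rfl]; omega
    · have := ih (acc ++ "/" ++ p) x hx
      simp [String.length_append, show "/".length = 1 from rfl] at this; omega

theorem pairwise_tailpref (t : List String) (acc : String) :
    (acc :: tailpref acc t).Pairwise (fun a b => a.length < b.length) := by
  induction t generalizing acc with
  | nil => simp [tailpref]
  | cons p t ih =>
    simp only [tailpref]
    refine List.Pairwise.cons ?_ (ih (acc ++ "/" ++ p))
    intro x hx
    rcases List.mem_cons.mp hx with rfl | hx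
    · simp [String.length_append, show "/".length = 1 from rfl]; omega
    · have := len_lt_tailpref t (acc ++ "/" ++ p) x hx
      simp [String.length_append, show "/".length = 1 from rfl] at this ⊢; omega

theorem nodup_tailpref (t : List String) (acc : String) :
    (acc :: tailpref acc t).Nodup :=
  (pairwise_tailpref t acc).imp (fun h => by
    intro he; subst he; omega)

theorem loopA (t : List String) (acc : String) (pre : PySem.Set String)
    (h : ∀ x ∈ pre, x.length ≤ acc.length) :
    (t.foldl
      (fun (st : String × PySem.Set String) p =>
        let sp := st.1 ++ "/" ++ p
        (sp, PySem.Set.add st.2 sp))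
      (acc, pre)).2 = pre ++ tailpref acc t := by
  induction t generalizing acc pre with
  | nil => simp [tailpref]
  | cons p t ih =>
    have hnm : (acc ++ "/" ++ p) ∉ pre := by
      intro hm
      have := h _ hm
      simp [String.length_append, show "/".length = 1 from rfl] at this; omega
    have hadd : PySem.Set.add pre (acc ++ "/" ++ p) = pre ++ [acc ++ "/" ++ p] := by
      simp [PySem.Set.add, hnm]
    simp only [List.foldl_cons, tailpref]
    rw [hadd, ih (acc ++ "/" ++ p) (pre ++ [acc ++ "/" ++ p]) ?_]
    · simp
    · intro x hx
      rcases List.mem_append.mp hx with hx | hx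
      · have := h _ hx; simp [String.length_append, show "/".length = 1 from rfl]; omega
      · simp at hx; subst hx; omega

theorem chars_join_merge (x y : List Char) (L : List (List Char)) :
    List.intercalate ['/'] (x :: y :: L) = List.intercalate ['/'] ((x ++ '/' :: y) :: L) := by
  cases L with
  | nil => simp [List.intercalate]
  | cons z L => simp [List.intercalate, List.intersperse]

theorem join_merge (a b : String) (l : List String) :
    PySem.Str.join "/" (a :: b :: l) = PySem.Str.join "/" ((a ++ "/" ++ b) :: l) := by
  apply String.toList_inj.mp
  simp [PySem.Str.join, PySem.Chars.join, chars_join_merge]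

theorem join_single (a : String) : PySem.Str.join "/" [a] = a := by
  apply String.toList_inj.mp
  simp [PySem.Str.join, PySem.Chars.join, List.intercalate]

theorem mapB (t : List String) (acc : String) :
    (List.range (t.length + 1)).map
        (fun i => PySem.Str.join "/" ((acc :: t).take (i + 1)))
      = acc :: tailpref acc t := by
  induction t generalizing acc with
  | nil => simp [tailpref, join_single]
  | cons p t ih =>
    simp only [List.length_cons]
    rw [List.range_succ_eq_map, List.map_cons, List.map_map]
    congr 1
    · simpa using join_single acc
    · have hfun : (fun i => PySem.Str.join "/" ((acc :: p :: t).take (i + 1))) ∘ Nat.succ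
          = fun i => PySem.Str.join "/" (((acc ++ "/" ++ p) :: t).take (i + 1)) := by
        funext i
        simp only [Function.comp, List.take_succ_cons]
        rw [join_merge]
      rw [hfun, ih (acc ++ "/" ++ p)]
      simp [tailpref]

-- ===== VERDICT (by name: the statement is the Claim_ definition above) =====
theorem generate_subpaths_spec : Claim_equal_generate_subpaths := by
  intro path _
  unfold Spec_generate_subpaths generate_subpaths generate_subpaths_alt
  cases hp : (PySem.Str.split? path "/").getD [] with
  | nil => simp [PySem.Set.ofList]
  | cons h t =>
    have hA : (t.foldl
        (fun (st : String × PySem.Set String) p =>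
          (st.1 ++ "/" ++ p, PySem.Set.add st.2 (st.1 ++ "/" ++ p)))
        (h, PySem.Set.ofList [h])).2 = h :: tailpref h t := by
      have h1 : PySem.Set.ofList [h] = [h] :=
        PySem.Set.ofList_eq_self_of_nodup [h] (by simp)
      rw [h1, loopA t h [h] (by intro x hx; simp at hx; subst hx; exact le_refl _)]
      rfl
    have hB : ((PySem.List.pyRange 0 ((h :: t).length : Int)).map
        (fun i => PySem.Str.join "/" (PySem.List.slice (h :: t) none (some (i + 1)))))
        = h :: tailpref h t := by
      rw [PySem.List.pyRange_zero_natCast, List.map_map]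
      have : (fun i => PySem.Str.join "/" (PySem.List.slice (h :: t) none (some (i + 1))))
          ∘ (fun (k : Nat) => (k : Int))
          = fun k => PySem.Str.join "/" ((h :: t).take (k + 1)) := by
        funext k
        simp only [Function.comp]
        rw [show ((k : Int) + 1) = ((k + 1 : Nat) : Int) from by push_cast; ring,
          PySem.List.slice_to_natCast]
      rw [this]
      exact mapB t h
    simp only [hA, hB]
    rw [PySem.Set.ofList_eq_self_of_nodup _ (nodup_tailpref t h)]
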